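-- pv_equiv track=rewrite | github.com/erickmpangi/devoir | graphs/basic.py | min_subset_product
-- ===== SOURCE A (Python) =====
-- def min_subset_product(arr):
--     if not arr:
--         return 0
--     n = len(arr)
--     if n == 1:
--         return arr[0]
--     max_neg = float('-inf')
--     min_pos = float('inf')
--     count_neg = count_zero = 0
--     product = 1
--     for num in arr:
--         if num == 0:
--             count_zero += 1
--             continue
--         if num < 0:
--             count_neg += 1
--             max_neg = max(max_neg, num)
--         else:
--             min_pos = min(min_pos, num)
--         product *= num
--
--     if count_zero == n:
--         return 0
--
--     if count_neg == 0 and count_zero > 0: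
--         return 0
--
--     if count_neg % 2 == 1:
--         return product
--
--     if count_neg > 0:
--         return product // max_neg
--
--     return min_pos
-- ===== SOURCE B (Python) =====
-- def min_subset_product(arr):
--     if not arr:
--         return 0
--     if len(arr) == 1:
--         return arr[0]
--     s = sorted(arr)
--     k = 0
--     for x in s:
--         if x < 0:
--             k += 1
--     nz = [x for x in s if x != 0]
--     if not nz:
--         return 0
--     if k == 0:
--         if len(nz) < len(s):
--             return 0
--         return s[0]
--     skip = k - 1 if k % 2 == 0 else -1
--     p = 1
--     for i, x in enumerate(nz):
--         if i != skip:
--             p *= x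
--     return p
-- ===== Notes on version B (the rewrite author's own statement) =====
-- stated objective: alternative
-- what changed: Replaces A's single five-accumulator loop (running max/min/counts/product with float sentinels, then a floor division to drop the max negative) by sort-then-scan: sort the array once, split off the nonzeros, and compute the answer with one skip-index product pass that omits the positionally-last negative when the negative count is even, so no division and no running extrema are needed.
import Mathlib
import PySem

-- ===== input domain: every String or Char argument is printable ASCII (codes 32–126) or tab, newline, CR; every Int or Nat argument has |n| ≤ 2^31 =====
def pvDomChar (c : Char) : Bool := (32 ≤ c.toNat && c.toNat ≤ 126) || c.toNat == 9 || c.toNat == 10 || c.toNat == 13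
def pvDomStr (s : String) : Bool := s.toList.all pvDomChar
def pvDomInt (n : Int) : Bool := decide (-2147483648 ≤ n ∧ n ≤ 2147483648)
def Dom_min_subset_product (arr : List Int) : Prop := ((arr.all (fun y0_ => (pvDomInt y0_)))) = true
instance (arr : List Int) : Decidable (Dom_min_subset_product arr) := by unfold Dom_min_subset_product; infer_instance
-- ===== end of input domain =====

-- B sorts the array once and removes the maximal negative BY POSITION in a single skip-index
-- product pass, instead of A's five-accumulator loop followed by a floor division; objective: alternative.

-- ===== PORT A =====
-- A's loop state: (max_neg, min_pos, count_neg, count_zero, product);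
-- float('-inf')/float('inf') sentinels are represented by Option.none, exact because
-- max(-inf, num) = num and min(inf, num) = num in Python for every int num.
def pvLoopA : List Int → Option Int → Option Int → Int → Int → Int →
    Option Int × Option Int × Int × Int × Int
  | [], mn, mp, cn, cz, p => (mn, mp, cn, cz, p)
  | num :: t, mn, mp, cn, cz, p =>
    if num = 0 then pvLoopA t mn mp cn (cz + 1) p
    else if num < 0 then
      pvLoopA t (some (match mn with | none => num | some m => max m num)) mp (cn + 1) cz (p * num)
    else
      pvLoopA t mn (some (match mp with | none => num | some m => min m num)) cn cz (p * num)

def min_subset_product (arr : List Int) : Int :=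
  if arr = [] then 0
  else
    let n : Int := arr.length
    if n = 1 then arr.headD 0   -- arr[0]; exact, arr nonempty here
    else
      match pvLoopA arr none none 0 0 1 with
      | (mn, mp, cn, cz, p) =>
        if cz = n then 0
        else if cn = 0 ∧ cz > 0 then 0
        else if PySem.Int.mod cn 2 = 1 then p
        else if cn > 0 then PySem.Int.floordiv p (mn.getD 0)  -- mn is some here (cn > 0)
        else mp.getD 0                                         -- mp is some here

-- ===== PORT B =====
def min_subset_product_alt (arr : List Int) : Int :=
  if arr = [] then 0
  else if arr.length = 1 then arr.headD 0   -- arr[0]; exact, arr nonempty here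
  else
    let s := PySem.List.sorted arr (fun y => y) false
    let k := s.foldl (fun k x => if x < 0 then k + 1 else k) (0 : Int)
    let nz := s.filter (fun x => x ≠ 0)
    if nz = [] then 0
    else if k = 0 then
      if nz.length < s.length then 0 else s.headD 0   -- zeros present → 0, else min positive = s[0]
    else
      let skip : Int := if PySem.Int.mod k 2 = 0 then k - 1 else -1
      (PySem.List.enumerate nz 0).foldl
        (fun p ix => if ix.1 ≠ skip then p * ix.2 else p) 1

-- ===== PRECONDITION & SPEC =====
def Spec_min_subset_product (arr : List Int) (out : Int) : Prop := out = min_subset_product_alt arr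
instance (arr : List Int) (out : Int) : Decidable (Spec_min_subset_product arr out) := by unfold Spec_min_subset_product; infer_instance

-- ===== CLAIM (what is proved, stated in full; the proofs are below) =====
def Claim_equal_min_subset_product : Prop := ∀ (arr : List Int), Dom_min_subset_product arr → Spec_min_subset_product arr (min_subset_product arr)

-- ===== LEMMAS AND PROOFS =====

def pvProd (xs : List Int) : Int := xs.foldl (· * ·) 1

theorem pvProd_foldl (l : List Int) (a : Int) : l.foldl (· * ·) a = a * pvProd l := by
  induction l generalizing a with
  | nil => simp [pvProd]
  | cons x t ih => simp only [List.foldl_cons, pvProd, ih (a * x), ih (1 * x)]; ring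

theorem pvProd_cons (x : Int) (l : List Int) : pvProd (x :: l) = x * pvProd l := by
  simp only [pvProd, List.foldl_cons]
  rw [pvProd_foldl]; simp [pvProd]

theorem pvProd_append (l1 l2 : List Int) : pvProd (l1 ++ l2) = pvProd l1 * pvProd l2 := by
  simp only [pvProd, List.foldl_append]
  rw [pvProd_foldl]
  rfl

theorem pvProd_perm {l1 l2 : List Int} (h : l1.Perm l2) : pvProd l1 = pvProd l2 := by
  have : ∀ l : List Int, pvProd l = l.prod := fun l => (List.prod_eq_foldl).symm
  rw [this, this, h.prod_eq]

-- A's running-max over negatives, as a standalone fold.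
def pvMaxA (mn : Option Int) : List Int → Option Int
  | [] => mn
  | x :: t => pvMaxA (some (match mn with | none => x | some m => max m x)) t

def pvMinA (mp : Option Int) : List Int → Option Int
  | [] => mp
  | x :: t => pvMinA (some (match mp with | none => x | some m => min m x)) t

theorem pvMaxA_some (m : Int) (l : List Int) : pvMaxA (some m) l = some (l.foldl max m) := by
  induction l generalizing m with
  | nil => simp [pvMaxA]
  | cons x t ih => simp [pvMaxA, ih]

theorem pvMinA_some (m : Int) (l : List Int) : pvMinA (some m) l = some (l.foldl min m) := by
  induction l generalizing m with
  | nil => simp [pvMinA]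
  | cons x t ih => simp [pvMinA, ih]

theorem pvMaxA_eq_max? (l : List Int) : pvMaxA none l = PySem.List.max? l (fun y => y) := by
  cases l with
  | nil => exact ((PySem.List.max?_eq_none_iff [] (fun y => y)).mpr rfl).symm
  | cons x t => rw [pvMaxA, pvMaxA_some, PySem.List.max?_id_cons]

theorem pvMinA_eq_min? (l : List Int) : pvMinA none l = PySem.List.min? l (fun y => y) := by
  cases l with
  | nil => exact ((PySem.List.min?_eq_none_iff [] (fun y => y)).mpr rfl).symm
  | cons x t => rw [pvMinA, pvMinA_some, PySem.List.min?_id_cons]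

-- The master invariant: A's five-accumulator loop computes the four per-class reductions.
theorem pvLoopA_eq (l : List Int) (mn mp : Option Int) (cn cz p : Int) :
    pvLoopA l mn mp cn cz p =
      (pvMaxA mn (l.filter (fun x => x < 0)),
       pvMinA mp (l.filter (fun x => 0 < x)),
       cn + (l.filter (fun x => x < 0)).length,
       cz + (l.filter (fun x => x = 0)).length,
       p * pvProd (l.filter (fun x => x < 0)) * pvProd (l.filter (fun x => 0 < x))) := by
  induction l generalizing mn mp cn cz p with
  | nil => simp [pvLoopA, pvMaxA, pvMinA, pvProd]
  | cons x t ih =>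
    rcases lt_trichotomy x 0 with hx | hx | hx
    · have h0 : ¬ x = 0 := by omega
      simp only [pvLoopA, if_neg h0, ih, List.filter_cons, decide_eq_true_eq,
        if_pos hx, if_neg (show ¬ (0:Int) < x by omega), pvMaxA, pvProd_cons,
        Prod.mk.injEq, List.length_cons]
      and_intros <;> first | trivial | (push_cast; ring)
    · subst hx
      simp only [pvLoopA, ih, List.filter_cons, decide_eq_true_eq,
        if_neg (show ¬ (0:Int) < 0 by omega)]
      simp [Prod.mk.injEq]
      omega
    · have h0 : ¬ x = 0 := by omega
      have hneg : ¬ x < 0 := by omega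
      simp only [pvLoopA, if_neg h0, if_neg hneg, ih, List.filter_cons, decide_eq_true_eq,
        if_pos hx, pvMinA, pvProd_cons, Prod.mk.injEq]
      and_intros <;> first | trivial | ring

-- class sizes partition the length
theorem pvLen_partition (l : List Int) :
    (l.filter (fun x => x = 0)).length + (l.filter (fun x => x < 0)).length
      + (l.filter (fun x => 0 < x)).length = l.length := by
  induction l with
  | nil => simp
  | cons x t ih =>
    rcases lt_trichotomy x 0 with hx | hx | hx <;>
      simp only [List.filter_cons, decide_eq_true_eq, List.length_cons] <;>
      split_ifs <;> simp <;> omega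

-- in a ≤-sorted list the nonzeros are: the negatives (in order) followed by the positives
theorem pvSortedSplit (l : List Int) (hp : l.Pairwise (· ≤ ·)) :
    l.filter (fun x => x ≠ 0) = l.filter (fun x => x < 0) ++ l.filter (fun x => 0 < x) := by
  induction l with
  | nil => simp
  | cons a t ih =>
    rw [List.pairwise_cons] at hp
    obtain ⟨ha, ht⟩ := hp
    have IH := ih ht
    rcases lt_trichotomy a 0 with hx | hx | hx
    · simp only [List.filter_cons, decide_eq_true_eq,
        if_pos (show a ≠ 0 by omega), if_pos hx, if_neg (show ¬ (0:Int) < a by omega)]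
      rw [IH]; rfl
    · subst hx
      simp only [List.filter_cons]
      rw [if_neg (by decide), if_neg (by decide), if_neg (by decide)]
      exact IH
    · have hneg : t.filter (fun x => x < 0) = [] := by
        rw [List.filter_eq_nil_iff]
        intro b hb
        have := ha b hb
        simp only [decide_eq_true_eq]
        omega
      simp only [List.filter_cons, decide_eq_true_eq,
        if_pos (show a ≠ 0 by omega), if_neg (show ¬ a < 0 by omega), if_pos hx]
      rw [IH, hneg]
      rfl
-- every element of a nonempty ≤-sorted list is at most its last element
theorem pvLe_getLast (l : List Int) (h : l ≠ []) (hp : l.Pairwise (· ≤ ·)) :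
    ∀ y ∈ l, y ≤ l.getLast h := by
  intro y hy
  have hsplit := List.dropLast_concat_getLast h
  rw [← hsplit] at hp hy
  rw [List.pairwise_append] at hp
  rcases List.mem_append.mp hy with h1 | h2
  · exact hp.2.2 y h1 _ (List.mem_singleton_self _)
  · rw [List.mem_singleton] at h2; omega

-- the skip-index product pass, when the skip index is outside the enumerated range
theorem pvEnumFold_no_skip (l : List Int) (s0 skip p : Int)
    (h : skip < s0 ∨ s0 + l.length ≤ skip) :
    (PySem.List.enumerate l s0).foldl
      (fun p ix => if ix.1 ≠ skip then p * ix.2 else p) p = p * pvProd l := by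
  induction l generalizing s0 p with
  | nil => simp [PySem.List.enumerate_nil, pvProd]
  | cons x t ih =>
    rw [PySem.List.enumerate_cons, List.foldl_cons]
    have hlen : ((x :: t).length : Int) = (t.length : Int) + 1 := by push_cast [List.length_cons]; ring
    have hne : s0 ≠ skip := by rw [hlen] at h; omega
    rw [if_pos hne, ih (s0 + 1) (p * x) (by rw [hlen] at h; omega), pvProd_cons]
    ring

-- the skip-index product pass, skipping exactly the element at index l1.length
theorem pvEnumFold_skip (l1 : List Int) (m : Int) (l2 : List Int) :
    (PySem.List.enumerate (l1 ++ m :: l2) 0).foldl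
      (fun p ix => if ix.1 ≠ (l1.length : Int) then p * ix.2 else p) 1
      = pvProd l1 * pvProd l2 := by
  rw [PySem.List.enumerate_append, List.foldl_append,
    pvEnumFold_no_skip l1 0 _ 1 (Or.inr (by omega)),
    PySem.List.enumerate_cons, List.foldl_cons]
  rw [if_neg (by omega), pvEnumFold_no_skip l2 _ _ _ (Or.inl (by omega))]
  ring

-- ===== VERDICT (by name: the statement is the Claim_ definition above) =====
theorem min_subset_product_spec : Claim_equal_min_subset_product := by
  intro arr _
  show min_subset_product arr = min_subset_product_alt arr
  unfold min_subset_product min_subset_product_alt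
  by_cases hnil : arr = []
  · simp [hnil]
  · simp only [if_neg hnil]
    by_cases h1 : arr.length = 1
    · rw [if_pos (by omega : ((arr.length : Int)) = 1), if_pos h1]
    · rw [if_neg (by omega : ¬ ((arr.length : Int)) = 1), if_neg h1]
      rw [pvLoopA_eq]
      simp only [zero_add, one_mul]
      -- names for the pieces
      set s := PySem.List.sorted arr (fun y => y) false with hs
      have hperm : s.Perm arr := PySem.List.sorted_perm arr (fun y => y) false
      have hsorted : s.Pairwise (· ≤ ·) := by
        have := PySem.List.sorted_pairwise arr (fun y => y)
        exact this
      have hnegperm : (s.filter (fun x => x < 0)).Perm (arr.filter (fun x => x < 0)) :=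
        hperm.filter _
      have hposperm : (s.filter (fun x => 0 < x)).Perm (arr.filter (fun x => 0 < x)) :=
        hperm.filter _
      have hzerperm : (s.filter (fun x => x = 0)).Perm (arr.filter (fun x => x = 0)) :=
        hperm.filter _
      -- B's counting loop
      have hk : s.foldl (fun k x => if x < 0 then k + 1 else k) (0 : Int)
          = ((arr.filter (fun x => x < 0)).length : Int) := by
        have hfun : (fun (k : Int) (x : Int) => if x < 0 then k + 1 else k)
            = (fun (k : Int) (x : Int) => if (fun y => decide (y < (0:Int))) x = true then k + 1 else k) := by
          funext k x; simp
        rw [hfun, PySem.List.foldl_count_if, List.countP_eq_length_filter,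
          hnegperm.length_eq]
        simp
      rw [hk]
      have hsplit := pvSortedSplit s hsorted
      have hzlen := pvLen_partition arr
      have hzlen' :
          (s.filter (fun x => x = 0)).length = (arr.filter (fun x => x = 0)).length :=
        hzerperm.length_eq
      by_cases hnz : s.filter (fun x => x ≠ 0) = []
      · -- all elements of arr are zero
        rw [if_pos hnz]
        have hneg0 : (arr.filter (fun x => x < 0)).length = 0 := by
          rw [← hnegperm.length_eq]
          have : s.filter (fun x => x < 0) = [] := by
            rw [hsplit] at hnz
            exact (List.append_eq_nil_iff.mp hnz).1
          simp [this]
        have hpos0 : (arr.filter (fun x => 0 < x)).length = 0 := by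
          rw [← hposperm.length_eq]
          have : s.filter (fun x => 0 < x) = [] := by
            rw [hsplit] at hnz
            exact (List.append_eq_nil_iff.mp hnz).2
          simp [this]
        rw [if_pos (by omega : ((arr.filter (fun x => x = 0)).length : Int) = (arr.length : Int))]
      · rw [if_neg hnz]
        -- cz ≠ n
        have hnzlen : 0 < (s.filter (fun x => x ≠ 0)).length := List.length_pos_of_ne_nil hnz
        have hnzsum : (s.filter (fun x => x ≠ 0)).length
            = (arr.filter (fun x => x < 0)).length + (arr.filter (fun x => 0 < x)).length := by
          rw [hsplit, List.length_append, hnegperm.length_eq, hposperm.length_eq]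
        have hczn : ¬ ((arr.filter (fun x => x = 0)).length : Int) = (arr.length : Int) := by
          omega
        rw [if_neg hczn]
        by_cases hk0 : ((arr.filter (fun x => x < 0)).length : Int) = 0
        · rw [if_pos hk0]
          by_cases hcz : (0:Int) < ((arr.filter (fun x => x = 0)).length : Int)
          · rw [if_pos ⟨hk0, hcz⟩]
            rw [if_pos (show (s.filter (fun x => x ≠ 0)).length < s.length by
              have := pvLen_partition s
              have := hperm.length_eq
              omega)]
          · rw [if_neg (by rintro ⟨-, h⟩; omega)]
            have hmod : ¬ PySem.Int.mod ((arr.filter (fun x => x < 0)).length : Int) 2 = 1 := by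
              rw [hk0]; decide
            rw [if_neg hmod, if_neg (by omega : ¬ (0:Int) < ((arr.filter (fun x => x < 0)).length : Int))]
            -- no zeros and no negatives: every element is positive
            have hcz0 : (arr.filter (fun x => x = 0)).length = 0 := by omega
            have hparts := pvLen_partition s
            have hB : ¬ (s.filter (fun x => x ≠ 0)).length < s.length := by
              have h1 := hnegperm.length_eq
              have h2 := hposperm.length_eq
              omega
            rw [if_neg hB]
            -- s is nonempty; its head is the minimum of arr
            have hsnil : s ≠ [] := by
              intro h
              exact hnil ((PySem.List.sorted_eq_nil_iff arr (fun y => y) false).mp (hs ▸ h))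
            obtain ⟨m, t, hst⟩ : ∃ m t, s = m :: t := by
              cases hc : s with
              | nil => exact absurd hc hsnil
              | cons a b => exact ⟨a, b, rfl⟩
            have hhead : ∀ y ∈ arr, m ≤ y :=
              PySem.List.key_head_sorted_le arr (fun y => y) (hs ▸ hst)
            -- positives filter is all of arr
            have hposall : arr.filter (fun x => 0 < x) = arr := by
              rw [List.filter_eq_self]
              intro x hx
              have hx1 : ¬ x < 0 := by
                intro h
                have : x ∈ arr.filter (fun x => x < 0) := List.mem_filter.mpr ⟨hx, by simpa⟩
                rw [List.length_eq_zero_iff.mp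
                  (show (arr.filter (fun x => x < 0)).length = 0 by omega)] at this
                simp at this
              have hx2 : ¬ x = 0 := by
                intro h
                have : x ∈ arr.filter (fun x => x = 0) := List.mem_filter.mpr ⟨hx, by simpa⟩
                rw [List.length_eq_zero_iff.mp
                  (show (arr.filter (fun x => x = 0)).length = 0 from hcz0)] at this
                simp at this
              simpa using by omega
            rw [pvMinA_eq_min?, hposall, hst]
            rcases hmin : PySem.List.min? arr (fun y => y) with _ | mv
            · exact absurd ((PySem.List.min?_eq_none_iff arr (fun y => y)).mp hmin) hnil
            · have hm1 : mv ∈ arr := PySem.List.min?_mem hmin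
              have hm2 : ∀ y ∈ arr, mv ≤ y := PySem.List.min?_isMin hmin
              have hmem : m ∈ arr := hperm.subset (hst ▸ List.mem_cons_self)
              have : mv = m := le_antisymm (hm2 m hmem) (hhead mv hm1)
              simp [this]
        · rw [if_neg hk0]
          have hkpos : 0 < (arr.filter (fun x => x < 0)).length := by omega
          rw [if_neg (by rintro ⟨h, -⟩; omega)]
          rcases PySem.Int.mod_two_eq ((arr.filter (fun x => x < 0)).length : Int) with hm | hm
          · -- even number of negatives: A divides by the max negative, B skips it
            have hm' : ¬ PySem.Int.mod ((arr.filter (fun x => x < 0)).length : Int) 2 = 1 := by omega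
            rw [if_neg hm', if_pos (by omega : (0:Int) < ((arr.filter (fun x => x < 0)).length : Int)),
              if_pos hm]
            rw [pvMaxA_eq_max?]
            -- the sorted negatives, split as dropLast ++ [last]
            have hnegS : s.filter (fun x => x < 0) ≠ [] := by
              intro h
              have := hnegperm.length_eq
              rw [h] at this
              simp at this
              omega
            set negS := s.filter (fun x => x < 0) with hnegSdef
            set l1 := negS.dropLast with hl1
            set m := negS.getLast hnegS with hmdef
            have hsplit2 : l1 ++ [m] = negS := List.dropLast_concat_getLast hnegS
            have hlen1 : negS.length = l1.length + 1 := by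
              have h0 : 0 < negS.length := List.length_pos_of_ne_nil hnegS
              rw [hl1, List.length_dropLast]
              omega
            have hskip : ((arr.filter (fun x => x < 0)).length : Int) - 1 = (l1.length : Int) := by
              have := hnegperm.length_eq
              rw [← this, hlen1]
              push_cast
              ring
            rw [hskip, hsplit, ← hsplit2, List.append_assoc, List.singleton_append,
              pvEnumFold_skip]
            -- the max negative of arr is exactly m, the last sorted negative
            have hnegSpair : negS.Pairwise (· ≤ ·) := hsorted.sublist List.filter_sublist
            rcases hmax : PySem.List.max? (arr.filter (fun x => x < 0)) (fun y => y) with _ | mv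
            · rw [PySem.List.max?_eq_none_iff] at hmax
              rw [hmax] at hkpos
              simp at hkpos
            · have hmv1 : mv ∈ negS := hnegperm.mem_iff.mpr (PySem.List.max?_mem hmax)
              have hmv2 : mv ≤ m := pvLe_getLast negS hnegS hnegSpair mv hmv1
              have hmm : m ∈ arr.filter (fun x => x < 0) :=
                hnegperm.subset (List.getLast_mem hnegS)
              have hmv3 : m ≤ mv := PySem.List.max?_isMax hmax m hmm
              have hmvm : mv = m := le_antisymm hmv2 hmv3
              have hmneg : m < 0 := by
                have := (List.mem_filter.mp hmm).2
                simpa using this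
              have hprodneg : pvProd (arr.filter (fun x => x < 0)) = pvProd l1 * m := by
                rw [← pvProd_perm hnegperm, ← hsplit2, pvProd_append, pvProd_cons]
                simp [pvProd]
              have hkey : pvProd (arr.filter (fun x => x < 0)) * pvProd (arr.filter (fun x => 0 < x))
                  = (pvProd l1 * pvProd (s.filter (fun x => 0 < x))) * m := by
                rw [hprodneg, pvProd_perm hposperm]
                ring
              rw [hkey, hmax, hmvm]
              simp only [Option.getD_some, PySem.Int.floordiv]
              exact Int.mul_fdiv_cancel _ (by omega)
          · rw [if_pos hm, if_neg (by omega : ¬ PySem.Int.mod ((arr.filter (fun x => x < 0)).length : Int) 2 = 0)]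
            rw [pvEnumFold_no_skip _ 0 (-1) 1 (Or.inl (by omega)), hsplit, pvProd_append,
              pvProd_perm hnegperm, pvProd_perm hposperm]
            ring
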